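-- pv_equiv track=rewrite | github.com/gusanitor8/HammingCodes | main.py | position_bits
-- ===== SOURCE A (Python) =====
-- def position_bits(bit_string: str):
--     """
--     This function positions the bits of the original bit string onto a new bit string, leaving
--     spaces for the parity bits filled with 0s
--     :param bit_string: the string of bits we wish to encode
--     :return: a list of bits with the parity bits filled with 0s
--     """
--     parity_no = find_parity_bits(len(bit_string))
--     hamming_code_len = len(bit_string) + parity_no
--     hamming_code = ["0"] * hamming_code_len
--
--     # we save the indexes of the parity bits
--     parity_indexes = get_parity_indexes(parity_no)
--
--     # we iterate over the hamming code
--     og_index = 0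
--     new_index = 0
--     while og_index < len(bit_string):
--         if new_index in parity_indexes:
--             new_index += 1
--             continue
--         else:
--             hamming_code[new_index] = bit_string[og_index]
--
--         og_index += 1
--         new_index += 1
--
--     return hamming_code
--
-- def get_parity_indexes(parity_bit_no: int):
--     """
--     This function takes as a parameter the number of parity bits that are needed
--     and returns the indexes for the corresponding quantity of parity bits
--     :param parity_bit_no:
--     :return:
--     """
--     return [2 ** i - 1 for i in range(parity_bit_no)]
--
-- def find_parity_bits(d):
--     """
--     This function returns how many parity bits do we need for a message of length m
--     :param d:
--     :return:
--     """
--     p = 0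
--     while True:
--         if (2 ** p) >= (d + p + 1):
--             break
--         p += 1
--     return p
-- ===== SOURCE B (Python) =====
-- def find_parity_bits(d):
--     p = 0
--     while True:
--         if (2 ** p) >= (d + p + 1):
--             break
--         p += 1
--     return p
--
--
-- def position_bits(bit_string: str):
--     """Build the codeword by starting from the raw data bits and inserting a
--     '0' placeholder at each parity index in ascending order; every insertion
--     shifts the later data bits right, so they land in the non-parity slots."""
--     parity_no = find_parity_bits(len(bit_string))
--     hamming_code = list(bit_string)
--     for i in range(parity_no):
--         hamming_code.insert(2 ** i - 1, "0")
--     return hamming_code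
-- ===== Notes on version B (the rewrite author's own statement) =====
-- stated objective: faster
-- what changed: Replaces the preallocated zero array with a per-position membership scan over the parity-index list by starting from the raw data bits and inserting a zero placeholder at each parity index in ascending order, letting list.insert do the shifting.
import Mathlib
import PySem

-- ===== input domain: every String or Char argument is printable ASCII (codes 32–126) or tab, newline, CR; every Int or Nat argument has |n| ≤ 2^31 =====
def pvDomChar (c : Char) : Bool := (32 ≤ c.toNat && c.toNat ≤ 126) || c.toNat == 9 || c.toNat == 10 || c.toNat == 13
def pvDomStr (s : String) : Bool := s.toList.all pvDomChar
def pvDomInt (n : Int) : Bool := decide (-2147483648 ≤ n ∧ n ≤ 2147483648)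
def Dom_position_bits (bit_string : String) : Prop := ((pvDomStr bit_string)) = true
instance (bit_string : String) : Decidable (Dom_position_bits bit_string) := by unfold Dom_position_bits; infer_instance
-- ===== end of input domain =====

-- B replaces A's preallocated zero array and two-pointer skip-scan by inserting a "0"
-- at each parity index (ascending) into the raw data bits (measured faster in a timing run).

-- ===== PORT A =====
-- helper find_parity_bits: 'while True' loop, ported with fuel d+2 (proved sufficient below)
def pvFindParityGo : Nat → Nat → Nat → Nat
  | 0, _, p => p
  | f+1, d, p => if 2 ^ p ≥ d + p + 1 then p else pvFindParityGo f d (p+1)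

def find_parity_bits (d : Nat) : Nat := pvFindParityGo (d + 2) d 0

def get_parity_indexes (parity_bit_no : Nat) : List Nat :=
  (List.range parity_bit_no).map (fun i => 2 ^ i - 1)

-- A's while loop; fuel = hamming_code_len (each iteration increments new_index, and the
-- loop is proved below to stop after exactly hamming_code_len iterations)
def pvLoopA : Nat → Nat → Nat → List String → List Nat → List String → List String
  | 0, _, _, _, _, arr => arr
  | f+1, og, new, cs, idxs, arr =>
    if og < cs.length then
      if new ∈ idxs then pvLoopA f og (new+1) cs idxs arr
      else pvLoopA f (og+1) (new+1) cs idxs (arr.set new (cs.getD og "0"))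
    else arr

def position_bits (bit_string : String) : List String :=
  let cs := bit_string.toList.map (fun c => String.mk [c])
  let parity_no := find_parity_bits cs.length
  let hamming_code_len := cs.length + parity_no
  let parity_indexes := get_parity_indexes parity_no
  pvLoopA hamming_code_len 0 0 cs parity_indexes (List.replicate hamming_code_len "0")

-- ===== PORT B =====
def position_bits_alt (bit_string : String) : List String :=
  let parity_no := find_parity_bits bit_string.toList.length
  (List.range parity_no).foldl
    (fun acc i => PySem.List.insert acc ((2:Int)^i - 1) "0")
    (bit_string.toList.map (fun c => String.mk [c]))

-- ===== PRECONDITION & SPEC =====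
def Spec_position_bits (bit_string : String) (out : List String) : Prop := out = position_bits_alt bit_string
instance (bit_string : String) (out : List String) : Decidable (Spec_position_bits bit_string out) := by unfold Spec_position_bits; infer_instance

-- ===== CLAIM (what is proved, stated in full; the proofs are below) =====
def Claim_equal_position_bits : Prop := ∀ (bit_string : String), Dom_position_bits bit_string → Spec_position_bits bit_string (position_bits bit_string)

-- ===== LEMMAS AND PROOFS =====

-- the common intermediate shape: positions new..new+m-1, "0" at parity slots, else next char
def pvBuild (idxs : List Nat) : Nat → List String → Nat → List String
  | 0, _, _ => []
  | m+1, cs, new =>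
    if new ∈ idxs then "0" :: pvBuild idxs m cs (new+1)
    else cs.headD "0" :: pvBuild idxs m cs.tail (new+1)

def pvBuildNone : Nat → List String → List String
  | 0, _ => []
  | m+1, cs => cs.headD "0" :: pvBuildNone m cs.tail

lemma pvFindParityGo_spec (d : Nat) : ∀ f p, (∃ q, q < f ∧ 2 ^ (p+q) ≥ d + (p+q) + 1) →
    (2 ^ (pvFindParityGo f d p) ≥ d + pvFindParityGo f d p + 1 ∧
     ∀ j, p ≤ j → j < pvFindParityGo f d p → 2 ^ j < d + j + 1) := by
  intro f
  induction f with
  | zero => intro p ⟨q, hq, _⟩; omega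
  | succ f ih =>
    intro p ⟨q, hq, hge⟩
    simp only [pvFindParityGo]
    split
    · exact ⟨by assumption, fun j h1 h2 => absurd h1 (by omega)⟩
    · rename_i hlt
      have hq0 : q ≠ 0 := by rintro rfl; simp at hge; omega
      obtain ⟨h1, h2⟩ := ih (p+1) ⟨q-1, by omega, by
        have : p + 1 + (q - 1) = p + q := by omega
        rw [this]; exact hge⟩
      refine ⟨h1, fun j hj1 hj2 => ?_⟩
      rcases Nat.eq_or_lt_of_le hj1 with rfl | h
      · omega
      · exact h2 j h hj2

lemma find_parity_bits_spec (n : Nat) :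
    2 ^ (find_parity_bits n) ≥ n + find_parity_bits n + 1 ∧
    ∀ j, j < find_parity_bits n → 2 ^ j < n + j + 1 := by
  obtain ⟨h1, h2⟩ := pvFindParityGo_spec n (n+2) 0 ⟨n+1, by omega, by
    have := Nat.lt_two_pow_self (n := n)
    calc 2 ^ (0 + (n+1)) = 2 * 2 ^ n := by ring
    _ ≥ _ := by omega⟩
  exact ⟨h1, fun j hj => h2 j (Nat.zero_le _) hj⟩

lemma pvBuild_congr {l₁ l₂ : List Nat} (h : ∀ j, j ∈ l₁ ↔ j ∈ l₂) :
    ∀ m cs new, pvBuild l₁ m cs new = pvBuild l₂ m cs new := by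
  intro m
  induction m with
  | zero => intro cs new; rfl
  | succ m ih =>
    intro cs new
    simp only [pvBuild]
    by_cases hm : new ∈ l₁
    · rw [if_pos hm, if_pos ((h new).1 hm), ih]
    · rw [if_neg hm, if_neg (fun hc => hm ((h new).2 hc)), ih]

lemma pvBuild_high {idxs : List Nat} :
    ∀ m cs new, (∀ i ∈ idxs, i < new) → pvBuild idxs m cs new = pvBuildNone m cs := by
  intro m
  induction m with
  | zero => intro cs new _; rfl
  | succ m ih =>
    intro cs new h
    have hn : new ∉ idxs := fun hc => absurd (h new hc) (by omega)
    simp only [pvBuild, pvBuildNone, if_neg hn]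
    rw [ih _ _ (fun i hi => by have := h i hi; omega)]

lemma pvBuildNone_self : ∀ cs : List String, pvBuildNone cs.length cs = cs := by
  intro cs
  induction cs with
  | nil => rfl
  | cons x t ih => simp only [List.length_cons, pvBuildNone, List.headD_cons, List.tail_cons, ih]

lemma pvBuild_length (idxs : List Nat) : ∀ m cs new, (pvBuild idxs m cs new).length = m := by
  intro m
  induction m with
  | zero => intro cs new; rfl
  | succ m ih => intro cs new; simp only [pvBuild]; split <;> simp [ih]

lemma pvBuild_all {idxs : List Nat} :
    ∀ m cs new, (∀ j, new ≤ j → j < new + m → j ∈ idxs) →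
    pvBuild idxs m cs new = List.replicate m "0" := by
  intro m
  induction m with
  | zero => intro cs new _; rfl
  | succ m ih =>
    intro cs new h
    have hn : new ∈ idxs := h new (le_refl _) (by omega)
    simp only [pvBuild, if_pos hn, List.replicate_succ]
    rw [ih _ _ (fun j h1 h2 => h j (by omega) (by omega))]

lemma pvBuild_step (idxs : List Nat) (m : Nat) (cs : List String) (new : Nat) :
    pvBuild idxs (m+1) cs new
      = if new ∈ idxs then "0" :: pvBuild idxs m cs (new+1)
        else cs.headD "0" :: pvBuild idxs m cs.tail (new+1) := rfl

lemma pvBuild_insert {idxs : List Nat} {k : Nat} (hk : ∀ i ∈ idxs, i < k) :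
    ∀ m new cs, new ≤ k → k < new + (m+1) →
    pvBuild (k :: idxs) (m+1) cs new
      = (pvBuild idxs m cs new).take (k-new) ++ "0" :: (pvBuild idxs m cs new).drop (k-new) := by
  intro m
  induction m with
  | zero =>
    intro new cs h1 h2
    have heq : new = k := by omega
    subst heq
    simp [pvBuild]
  | succ m ih =>
    intro new cs h1 h2
    rcases Nat.eq_or_lt_of_le h1 with heq | hlt
    · subst heq
      rw [pvBuild_step (new :: idxs), if_pos (List.mem_cons_self ..)]
      rw [pvBuild_high (m+1) cs (new+1) (by
        intro i hi
        rcases List.mem_cons.1 hi with h | h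
        · omega
        · have := hk i h; omega)]
      rw [Nat.sub_self, List.take_zero, List.drop_zero, List.nil_append]
      rw [pvBuild_high (m+1) cs new hk]
    · have hne : new ≠ k := by omega
      have hsub : k - new = (k - (new+1)) + 1 := by omega
      by_cases hm : new ∈ idxs
      · rw [pvBuild_step (k :: idxs), if_pos (List.mem_cons_of_mem _ hm),
          ih (new+1) cs (by omega) (by omega),
          pvBuild_step idxs, if_pos hm, hsub]
        simp
      · have hm' : new ∉ k :: idxs := by
          intro hc; rcases List.mem_cons.1 hc with h | h
          · exact hne h
          · exact hm h
        rw [pvBuild_step (k :: idxs), if_neg hm',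
          ih (new+1) cs.tail (by omega) (by omega),
          pvBuild_step idxs, if_neg hm, hsub]
        simp

lemma pv_drop_headD {cs : List String} {og : Nat} (_h : og < cs.length) (d : String) :
    (cs.drop og).headD d = cs.getD og d := by
  simp [List.head?_eq_getElem?, List.getElem?_drop, List.getD]

lemma pvLoopA_eq (cs : List String) (idxs : List Nat) :
    ∀ m og new (pre : List String), og ≤ cs.length →
    (∀ i ∈ idxs, i < new + m) →
    ((List.range' new m).filter (fun j => decide (j ∉ idxs))).length = cs.length - og →
    pre.length = new →
    pvLoopA m og new cs idxs (pre ++ List.replicate m "0")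
      = pre ++ pvBuild idxs m (cs.drop og) new := by
  intro m
  induction m with
  | zero =>
    intro og new pre _ _ _ _
    simp [pvLoopA, pvBuild]
  | succ m ih =>
    intro og new pre hog hb hcnt hpre
    simp only [pvLoopA]
    by_cases hlt : og < cs.length
    · rw [if_pos hlt]
      rw [List.range'_succ] at hcnt
      by_cases hm : new ∈ idxs
      · rw [if_pos hm]
        have hcnt' : ((List.range' (new+1) m).filter (fun j => decide (j ∉ idxs))).length
            = cs.length - og := by
          simpa [List.filter_cons, hm] using hcnt
        have := ih og (new+1) (pre ++ ["0"]) hog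
          (fun i hi => by have := hb i hi; omega) hcnt' (by simp [hpre])
        rw [List.replicate_succ]
        have harr : pre ++ "0" :: List.replicate m "0"
            = (pre ++ ["0"]) ++ List.replicate m "0" := by simp
        rw [harr, this]
        simp [pvBuild, if_pos hm]
      · rw [if_neg hm]
        have hcnt' : ((List.range' (new+1) m).filter (fun j => decide (j ∉ idxs))).length
            = cs.length - (og+1) := by
          simp only [List.filter_cons, decide_eq_true_eq] at hcnt
          rw [if_pos (by simpa using hm)] at hcnt
          simp only [List.length_cons] at hcnt
          omega
        have hset : (pre ++ List.replicate (m+1) "0").set new (cs.getD og "0")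
            = (pre ++ [cs.getD og "0"]) ++ List.replicate m "0" := by
          rw [List.replicate_succ, List.set_append]
          rw [if_neg (by omega)]
          rw [hpre, Nat.sub_self, List.set_cons_zero]
          simp
        rw [hset]
        rw [ih (og+1) (new+1) (pre ++ [cs.getD og "0"]) (by omega)
          (fun i hi => by have := hb i hi; omega) hcnt' (by simp [hpre])]
        simp only [pvBuild, if_neg hm]
        rw [← pv_drop_headD hlt "0", List.tail_drop]
        simp
    · rw [if_neg hlt]
      have hog' : og = cs.length := by omega
      have hall : ∀ j, new ≤ j → j < new + (m+1) → j ∈ idxs := by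
        intro j h1 h2
        by_contra hc
        have hlen0 : ((List.range' new (m+1)).filter (fun j => decide (j ∉ idxs))).length = 0 := by
          omega
        have hnil := List.length_eq_zero_iff.1 hlen0
        have hj : j ∈ (List.range' new (m+1)).filter (fun j => decide (j ∉ idxs)) :=
          List.mem_filter.2 ⟨List.mem_range'_1.2 ⟨h1, h2⟩, by simpa using hc⟩
        rw [hnil] at hj
        simp at hj
      rw [pvBuild_all _ _ _ hall]

lemma pv_filter_not_mem_length {l : List Nat} {M : Nat} (hn : l.Nodup)
    (hlt : ∀ i ∈ l, i < M) :
    ((List.range M).filter (fun j => decide (j ∉ l))).length + l.length = M := by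
  have hperm : List.Perm ((List.range M).filter (fun j => decide (j ∈ l))) l := by
    rw [List.perm_ext_iff_of_nodup (List.Nodup.filter _ (List.nodup_range)) hn]
    intro a
    simp only [List.mem_filter, List.mem_range, decide_eq_true_eq]
    exact ⟨fun h => h.2, fun h => ⟨hlt a h, h⟩⟩
  have hlen := hperm.length_eq
  have hsplit2 := List.length_eq_length_filter_add (l := List.range M)
    (fun j => decide (j ∈ l))
  have hr : (List.range M).length = M := List.length_range
  have hnotnot : (List.range M).filter (fun j => !decide (j ∈ l))
      = (List.range M).filter (fun j => decide (j ∉ l)) := by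
    apply List.filter_congr; intro x _; simp
  rw [hnotnot] at hsplit2
  omega

lemma pv_parity_indexes_mem {p i : Nat} :
    i ∈ get_parity_indexes p ↔ ∃ t, t < p ∧ 2 ^ t - 1 = i := by
  simp [get_parity_indexes]

lemma pv_parity_indexes_nodup (p : Nat) : (get_parity_indexes p).Nodup := by
  apply List.Nodup.map _ List.nodup_range
  intro a b h
  have h' : 2 ^ a - 1 = 2 ^ b - 1 := by simpa using h
  have ha : 1 ≤ 2 ^ a := Nat.one_le_two_pow
  have hb : 1 ≤ 2 ^ b := Nat.one_le_two_pow
  have : 2 ^ a = 2 ^ b := by omega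
  exact Nat.pow_right_injective (by omega) this

lemma pv_foldl_insert_eq (cs : List String)
    (p : Nat) (H2 : ∀ j, j < p → 2 ^ j < cs.length + j + 1) :
    ∀ j, j ≤ p →
    (List.range j).foldl (fun acc i => PySem.List.insert acc ((2:Int)^i - 1) "0") cs
      = pvBuild (get_parity_indexes j) (cs.length + j) cs 0 := by
  intro j
  induction j with
  | zero =>
    intro _
    simp only [List.range_zero, List.foldl_nil, Nat.add_zero]
    rw [pvBuild_high _ _ _ (by simp [get_parity_indexes]), pvBuildNone_self]
  | succ j ih =>
    intro hj
    rw [List.range_succ, List.foldl_append, List.foldl_cons, List.foldl_nil,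
      ih (by omega)]
    have h2j : 2 ^ j < cs.length + j + 1 := H2 j (by omega)
    have h1 : 1 ≤ 2 ^ j := Nat.one_le_two_pow
    set k : Nat := 2 ^ j - 1 with hk
    have hcast : ((2:Int)^j - 1) = (k : Int) := by
      have : ((2:Nat)^j : Int) = (2:Int)^j := by push_cast; ring
      omega
    have hklen : k ≤ (pvBuild (get_parity_indexes j) (cs.length + j) cs 0).length := by
      rw [pvBuild_length]; omega
    rw [hcast, PySem.List.insert_natCast _ _ _ hklen]
    have hlt : ∀ i ∈ get_parity_indexes j, i < k := by
      intro i hi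
      obtain ⟨t, ht, rfl⟩ := pv_parity_indexes_mem.1 hi
      have : 2 ^ t < 2 ^ j := Nat.pow_lt_pow_right (by omega) ht
      have : 1 ≤ 2 ^ t := Nat.one_le_two_pow
      omega
    have := pvBuild_insert hlt (cs.length + j) 0 cs (by omega) (by omega)
    simp only [Nat.sub_zero] at this
    rw [← this]
    have hmem : ∀ x, x ∈ (k :: get_parity_indexes j) ↔ x ∈ get_parity_indexes (j+1) := by
      intro x
      simp only [List.mem_cons, pv_parity_indexes_mem]
      constructor
      · rintro (rfl | ⟨t, ht, rfl⟩)
        · exact ⟨j, by omega, rfl⟩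
        · exact ⟨t, by omega, rfl⟩
      · rintro ⟨t, ht, rfl⟩
        rcases Nat.lt_succ_iff_lt_or_eq.1 ht with h | rfl
        · exact Or.inr ⟨t, h, rfl⟩
        · exact Or.inl rfl
    rw [pvBuild_congr hmem]
    have h3 : cs.length + j + 1 = cs.length + (j + 1) := by omega
    rw [h3]

-- ===== VERDICT (by name: the statement is the Claim_ definition above) =====
theorem position_bits_spec : Claim_equal_position_bits := by
  intro bit_string _
  unfold Spec_position_bits position_bits position_bits_alt
  simp only [List.length_map]
  set cs : List String := bit_string.toList.map (fun c => String.mk [c]) with hcs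
  have hcslen : cs.length = bit_string.toList.length := by simp [hcs]
  set n := bit_string.toList.length with hn
  set p := find_parity_bits n with hp
  obtain ⟨H1, H2⟩ := find_parity_bits_spec n
  have hbound : ∀ i ∈ get_parity_indexes p, i < n + p := by
    intro i hi
    obtain ⟨t, ht, rfl⟩ := pv_parity_indexes_mem.1 hi
    have := H2 t ht
    have : 1 ≤ 2 ^ t := Nat.one_le_two_pow
    omega
  have hcnt : ((List.range' 0 (n + p)).filter
      (fun j => decide (j ∉ get_parity_indexes p))).length = cs.length - 0 := by
    rw [← List.range_eq_range']
    have := pv_filter_not_mem_length (pv_parity_indexes_nodup p) hbound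
    have hplen : (get_parity_indexes p).length = p := by
      simp [get_parity_indexes]
    omega
  have hA := pvLoopA_eq cs (get_parity_indexes p) (n + p) 0 0 [] (by omega)
    (fun i hi => by have := hbound i hi; omega) hcnt rfl
  simp only [List.nil_append, List.drop_zero] at hA
  rw [hA]
  rw [pv_foldl_insert_eq cs p (by rw [hcslen]; exact H2) p (le_refl _)]
  rw [hcslen]
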